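-- pv_equiv track=rewrite | github.com/shagyeong/solvedac | pyhton/단계별 풀이/5. 일차원 배열/8958 ox퀴즈.py | oxox
-- ===== SOURCE A (Python) =====
-- def oxox(array):
--     score = 0
--     streak = 0
--
--     for i in array:
--         if i == "O":
--             streak += 1
--         else:
--             streak = 0
--         score = score + streak
--     return score
-- ===== SOURCE B (Python) =====
-- def oxox(array):
--     # Group into maximal runs of "O" and add the triangular number L*(L+1)//2 per run.
--     score = 0
--     i = 0
--     n = len(array)
--     while i < n:
--         if array[i] == "O":
--             j = i
--             while j < n and array[j] == "O":
--                 j += 1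
--             L = j - i
--             score += L * (L + 1) // 2
--             i = j
--         else:
--             i += 1
--     return score
-- ===== Notes on version B (the rewrite author's own statement) =====
-- stated objective: alternative
-- what changed: B scans for maximal runs of "O" and adds a closed-form triangular sum L*(L+1)//2 per run, instead of A's per-element streak accumulator added at every step.
import Mathlib
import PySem

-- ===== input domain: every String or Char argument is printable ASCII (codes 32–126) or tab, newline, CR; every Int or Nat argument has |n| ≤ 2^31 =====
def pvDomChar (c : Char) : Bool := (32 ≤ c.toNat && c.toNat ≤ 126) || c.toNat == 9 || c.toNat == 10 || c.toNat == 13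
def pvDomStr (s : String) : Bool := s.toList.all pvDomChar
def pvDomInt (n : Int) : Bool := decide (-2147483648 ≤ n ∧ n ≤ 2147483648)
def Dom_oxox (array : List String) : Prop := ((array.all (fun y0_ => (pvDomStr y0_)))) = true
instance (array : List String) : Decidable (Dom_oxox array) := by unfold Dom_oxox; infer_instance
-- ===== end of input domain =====

-- B replaces A's per-element streak accumulator by a run scanner that adds a
-- closed-form triangular sum per maximal run of "O" (objective: alternative decomposition).

-- ===== PORT A =====
-- A's loop, state (score, streak), one step per element.
def oxoxLoop : List String → Int → Int → Int
  | [], score, _ => score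
  | i :: t, score, streak =>
    if i = "O" then oxoxLoop t (score + (streak + 1)) (streak + 1)
    else oxoxLoop t (score + 0) 0

def oxox (array : List String) : Int := oxoxLoop array 0 0

-- ===== PORT B =====
-- leading-run length of "O"s (Source B's inner while loop) and the rest after it
def oCount : List String → Nat
  | [] => 0
  | x :: t => if x = "O" then 1 + oCount t else 0

def oDrop : List String → List String
  | [] => []
  | x :: t => if x = "O" then oDrop t else x :: t

theorem oDrop_length_le : ∀ t : List String, (oDrop t).length ≤ t.length := by
  intro t
  induction t with
  | nil => simp [oDrop]
  | cons x t ih =>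
    simp only [oDrop]
    split
    · exact Nat.le_trans ih (Nat.le_succ _)
    · simp

def oxox_alt : List String → Int
  | [] => 0
  | x :: t =>
    if x = "O" then
      let L : Nat := 1 + oCount t
      (↑(L * (L + 1) / 2) : Int) + oxox_alt (oDrop t)
    else oxox_alt t
termination_by l => l.length
decreasing_by
  · exact Nat.lt_succ_of_le (oDrop_length_le t)
  · simp

-- ===== PRECONDITION & SPEC =====
def Spec_oxox (array : List String) (out : Int) : Prop := out = oxox_alt array
instance (array : List String) (out : Int) : Decidable (Spec_oxox array out) := by unfold Spec_oxox; infer_instance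

-- ===== CLAIM (what is proved, stated in full; the proofs are below) =====
def Claim_equal_oxox : Prop := ∀ (array : List String), Dom_oxox array → Spec_oxox array (oxox array)

-- ===== LEMMAS AND PROOFS =====

-- A's score accumulator is additive
theorem oxoxLoop_add : ∀ (t : List String) (s k : Int),
    oxoxLoop t s k = s + oxoxLoop t 0 k := by
  intro t
  induction t with
  | nil => intro s k; simp [oxoxLoop]
  | cons x t ih =>
    intro s k
    simp only [oxoxLoop]
    split
    · rw [ih (s + (k + 1)), ih (0 + (k + 1))]; ring
    · rw [ih (s + 0), ih (0 + 0)]; ring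

-- triangular number, kept folded so casts treat it as an atom
def triN (n : Nat) : Nat := n * (n + 1) / 2

theorem triN_succ (n : Nat) : triN (n + 1) = (n + 1) + triN n := by
  unfold triN
  obtain ⟨m, hm⟩ := Nat.even_mul_succ_self n
  have h2 : (n + 1) * (n + 1 + 1) = n * (n + 1) + 2 * (n + 1) := by ring
  omega

-- running A's loop with streak k over a leading "O"-run of length c adds
-- c*k + c*(c+1)/2 and continues past the run with streak 0
theorem oxoxLoop_run : ∀ (t : List String) (k : Nat),
    oxoxLoop t 0 (↑k) =
      (↑(oCount t) : Int) * (↑k) + (↑(triN (oCount t)) : Int)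
        + oxoxLoop (oDrop t) 0 0 := by
  intro t
  induction t with
  | nil => intro k; simp [oxoxLoop, oCount, oDrop, triN]
  | cons x t ih =>
    intro k
    by_cases hx : x = "O"
    · simp only [oxoxLoop, oCount, oDrop, hx, if_true]
      have hk : ((k : Int) + 1) = ((k + 1 : Nat) : Int) := by push_cast; ring
      rw [oxoxLoop_add t (0 + ((k : Int) + 1)) ((k : Int) + 1), hk, ih (k + 1)]
      rw [show (1 + oCount t) = oCount t + 1 from by omega, triN_succ (oCount t)]
      push_cast
      ring
    · simp only [oxoxLoop, oCount, oDrop, if_neg hx]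
      simp

theorem main_eq : ∀ (n : Nat) (t : List String), t.length ≤ n →
    oxoxLoop t 0 0 = oxox_alt t := by
  intro n
  induction n with
  | zero =>
    intro t ht
    have : t = [] := List.length_eq_zero_iff.mp (Nat.le_zero.mp ht)
    subst this; simp [oxoxLoop, oxox_alt]
  | succ n ih =>
    intro t ht
    match t with
    | [] => simp [oxoxLoop, oxox_alt]
    | x :: t =>
      by_cases hx : x = "O"
      · simp only [oxox_alt, oxoxLoop, hx, if_true]
        have h0 : ((0 : Int) + (0 + 1)) = ((1 : Nat) : Int) := by norm_num
        rw [h0, oxoxLoop_add t ((1 : Nat) : Int) (0 + 1),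
          show ((0 : Int) + 1) = ((1 : Nat) : Int) from by norm_num, oxoxLoop_run t 1]
        have hrest : oxoxLoop (oDrop t) 0 0 = oxox_alt (oDrop t) := by
          apply ih
          exact Nat.le_trans (oDrop_length_le t) (Nat.le_of_succ_le_succ ht)
        rw [hrest]
        rw [show (1 + oCount t) * (1 + oCount t + 1) / 2 = triN (oCount t + 1) from by
          unfold triN; rw [show (1 + oCount t) = oCount t + 1 from by omega]]
        rw [triN_succ (oCount t)]
        push_cast
        ring
      · simp only [oxox_alt, oxoxLoop, if_neg hx]
        rw [show ((0:Int) + 0) = 0 from rfl]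
        exact ih t (Nat.le_of_succ_le_succ ht)

-- ===== VERDICT (by name: the statement is the Claim_ definition above) =====
theorem oxox_spec : Claim_equal_oxox := by
  intro array _
  unfold Spec_oxox oxox
  exact main_eq array.length array (Nat.le_refl _)
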